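-- pv_equiv track=rewrite | github.com/ralfguth/langrisser3-english | tests/test_encoder_coverage.py | _extract_text_chars
-- ===== SOURCE A (Python) =====
-- def _extract_text_chars(line: str) -> str:
--     """Extract text characters from a script line, same as the encoder's segmenter.
--
--     Strips:
--     - <$XXXX> control codes (and their contents)
--     - [diehardt's name] variable references
--     - Leading/trailing whitespace
--     Then applies ... -> ellipsis replacement (same as encoder).
--     """
--     result = []
--     i = 0
--     while i < len(line):
--         # [diehardt's name] — handled as control code by encoder
--         if line[i:].lower().startswith("[diehardt's name]"):
--             i += 17
--             continue
--         # <$XXXX> escape sequences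
--         if line[i:i+2] == '<$':
--             end = line.find('>', i + 2)
--             if end != -1:
--                 i = end + 1
--                 continue
--         result.append(line[i])
--         i += 1
--     text = ''.join(result)
--     # Encoder replaces ... with ellipsis
--     text = text.replace('...', '\u2026')
--     return text
-- ===== SOURCE B (Python) =====
-- import re
--
-- # One leftmost regex substitution replaces A's manual index scanner; alternation
-- # order (diehardt first) preserves per-position priority, and [^>]*> leaves an
-- # unterminated "<$..." untouched, exactly like A's fallthrough.
-- _TOKEN_RE = re.compile(r"\[diehardt's name\]|<\$[^>]*>", re.IGNORECASE)
--
--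
-- def _extract_text_chars(line: str) -> str:
--     text = _TOKEN_RE.sub("", line)
--     return text.replace('...', '\u2026')
-- ===== Notes on version B (the rewrite author's own statement) =====
-- stated objective: idiomatic
-- what changed: The manual index-based while-loop scanner (which lowercases and slices the remaining string at every position) is replaced by a single precompiled regex alternation substituted left-to-right in one pass, followed by the same ellipsis replace.
import Mathlib
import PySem

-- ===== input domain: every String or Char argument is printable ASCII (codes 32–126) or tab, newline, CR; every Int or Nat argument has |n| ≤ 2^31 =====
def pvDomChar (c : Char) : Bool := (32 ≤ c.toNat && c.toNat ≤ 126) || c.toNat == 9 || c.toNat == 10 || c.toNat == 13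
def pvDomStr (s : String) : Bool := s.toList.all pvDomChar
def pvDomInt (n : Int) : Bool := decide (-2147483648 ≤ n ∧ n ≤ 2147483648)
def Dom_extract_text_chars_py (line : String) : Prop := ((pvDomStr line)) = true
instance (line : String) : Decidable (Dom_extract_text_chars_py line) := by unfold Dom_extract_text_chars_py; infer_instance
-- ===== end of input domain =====

-- B replaces A's manual index-based scanner with one leftmost regex-style
-- substitution pass (idiomatic); the return values are proved equal on all inputs.

-- ===== PORT A =====
def pvDieTok : List Char := "[diehardt's name]".toList

-- index-based while loop of A; i strictly increases, so recursion on s.length - i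
def pvLoopA (s : List Char) (i : Nat) (result : List Char) : List Char :=
  if h : i < s.length then
    if PySem.Chars.startswith (PySem.Chars.lower (s.drop i)) pvDieTok then
      pvLoopA s (i + 17) result
    else if hc : PySem.List.slice s (some (i : Int)) (some ((i : Int) + 2)) = ['<', '$'] then
      if he : PySem.Chars.findFrom s ['>'] ((i : Int) + 2) none ≠ -1 then
        pvLoopA s ((PySem.Chars.findFrom s ['>'] ((i : Int) + 2) none).toNat + 1) result
      else
        pvLoopA s (i + 1) (result ++ [s[i]])
    else
      pvLoopA s (i + 1) (result ++ [s[i]])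
  else result
termination_by s.length - i
decreasing_by
  · omega
  · have h2 : i + 2 ≤ s.length := by
      have := congrArg List.length hc
      rw [PySem.List.length_slice] at this
      simp [PySem.List.clampIdx] at this
      split_ifs at this <;> omega
    have hcast : (((i + 2 : Nat)) : Int) = (i : Int) + 2 := by push_cast; ring
    have he' : PySem.Chars.findFrom s ['>'] (((i + 2 : Nat)) : Int) none ≠ -1 := by
      rw [hcast]; exact he
    have hspec := (PySem.Chars.findFrom_natCast_spec s ['>'] (i + 2) h2 he').1
    rw [hcast] at hspec
    omega
  · omega
  · omega

def extract_text_chars_py (line : String) : String :=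
  let text := String.ofList (pvLoopA line.toList 0 [])
  PySem.Str.replace text "..." "…"

-- ===== PORT B =====
-- hand port of the regex piece "[^>]*>": consume up to and including the first '>' (exact)
def pvSkipGt : List Char → Option (List Char)
  | [] => none
  | c :: r => if c = '>' then some r else pvSkipGt r

-- hand port of the regex alternative "<\$[^>]*>" matched at the head (exact)
def pvCtrl : List Char → Option (List Char)
  | c1 :: c2 :: r => if c1 = '<' ∧ c2 = '$' then pvSkipGt r else none
  | _ => none

theorem pvSkipGt_length : ∀ {l r : List Char}, pvSkipGt l = some r → r.length < l.length := by
  intro l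
  induction l with
  | nil => intro r h; simp [pvSkipGt] at h
  | cons c t ih =>
    intro r h
    simp only [pvSkipGt] at h
    split at h
    · cases h; simp
    · have := ih h; simp; omega

theorem pvCtrl_length {l r : List Char} (h : pvCtrl l = some r) : r.length < l.length := by
  match l with
  | [] => simp [pvCtrl] at h
  | [c] => simp [pvCtrl] at h
  | c1 :: c2 :: t =>
    simp only [pvCtrl] at h
    split at h
    · have := pvSkipGt_length h; simp; omega
    · cases h

-- leftmost left-to-right regex substitution (hand port of re.sub, exact:
-- at each position first try the diehardt alternative case-insensitively, then
-- the control-code alternative; on failure the character survives)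
def pvSub : List Char → List Char
  | [] => []
  | c :: rest =>
    if ((c :: rest).take 17).map PySem.Chars.lowerChar = pvDieTok then
      pvSub (rest.drop 16)
    else
      match hm : pvCtrl (c :: rest) with
      | some r => pvSub r
      | none => c :: pvSub rest
termination_by l => l.length
decreasing_by
  all_goals first
    | exact pvCtrl_length hm
    | (simp; omega)
    | simp

def extract_text_chars_py_alt (line : String) : String :=
  let text := String.ofList (pvSub line.toList)
  PySem.Str.replace text "..." "…"

-- ===== PRECONDITION & SPEC =====
def Spec_extract_text_chars_py (line : String) (out : String) : Prop := out = extract_text_chars_py_alt line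
instance (line : String) (out : String) : Decidable (Spec_extract_text_chars_py line out) := by unfold Spec_extract_text_chars_py; infer_instance

-- ===== CLAIM (what is proved, stated in full; the proofs are below) =====
def Claim_equal_extract_text_chars_py : Prop := ∀ (line : String), Dom_extract_text_chars_py line → Spec_extract_text_chars_py line (extract_text_chars_py line)

-- ===== LEMMAS AND PROOFS =====

theorem pvSub_nil : pvSub [] = [] := by rw [pvSub]

theorem pvSub_cons (c : Char) (rest : List Char) :
    pvSub (c :: rest) =
      if ((c :: rest).take 17).map PySem.Chars.lowerChar = pvDieTok then
        pvSub (rest.drop 16)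
      else
        match pvCtrl (c :: rest) with
        | some r => pvSub r
        | none => c :: pvSub rest := by
  rw [pvSub]
  split
  · rfl
  · cases h' : pvCtrl (c :: rest) <;> simp [h']

theorem die_iff (l : List Char) :
    PySem.Chars.startswith (PySem.Chars.lower l) pvDieTok = true ↔
      (l.take 17).map PySem.Chars.lowerChar = pvDieTok := by
  rw [PySem.Chars.startswith_iff]
  have hl : PySem.Chars.lower l = l.map PySem.Chars.lowerChar := rfl
  have h17 : pvDieTok.length = 17 := rfl
  rw [hl, List.prefix_iff_eq_take, h17, ← List.map_take]
  exact eq_comm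

theorem singleton_prefix_iff (a : Char) (m : List Char) : [a] <+: m ↔ m.head? = some a := by
  cases m with
  | nil => simp
  | cons b t =>
    constructor
    · rintro ⟨u, hu⟩; cases hu; simp
    · intro h; simp at h; subst h; exact ⟨t, rfl⟩

theorem skipGt_none_of_not_mem {l : List Char} (h : '>' ∉ l) : pvSkipGt l = none := by
  induction l with
  | nil => rfl
  | cons c t ih =>
    simp only [pvSkipGt]
    simp at h
    rw [if_neg (fun hc => h.1 hc.symm)]
    exact ih h.2

theorem skipGt_first : ∀ (l : List Char) (k : Nat), l[k]? = some '>' →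
    (∀ j, j < k → l[j]? ≠ some '>') → pvSkipGt l = some (l.drop (k + 1)) := by
  intro l
  induction l with
  | nil => intro k hk _; simp at hk
  | cons c t ih =>
    intro k hk hmin
    cases k with
    | zero =>
      simp at hk
      simp [pvSkipGt, hk]
    | succ k' =>
      have hc : c ≠ '>' := by
        intro hc; exact hmin 0 (by omega) (by simp [hc])
      simp only [pvSkipGt, if_neg hc]
      have := ih k' (by simpa using hk) (fun j hj => by
        have := hmin (j + 1) (by omega); simpa using this)
      simpa using this

theorem loopA_eq (s : List Char) (i : Nat) (result : List Char) :
    pvLoopA s i result = result ++ pvSub (s.drop i) := by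
  rw [pvLoopA]
  split
  case isFalse h =>
    rw [List.drop_eq_nil_of_le (by omega), pvSub_nil, List.append_nil]
  case isTrue h =>
    have hdrop : s.drop i = s[i] :: s.drop (i + 1) := List.drop_eq_getElem_cons h
    by_cases hd : PySem.Chars.startswith (PySem.Chars.lower (s.drop i)) pvDieTok = true
    · rw [if_pos hd, loopA_eq s (i + 17) result]
      have hd' := (die_iff _).mp hd
      rw [hdrop] at hd'
      rw [hdrop, pvSub_cons, if_pos hd', List.drop_drop]
    · have hdie0 : ¬ ((s.drop i).take 17).map PySem.Chars.lowerChar = pvDieTok :=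
        fun hcond => hd ((die_iff _).mpr hcond)
      rw [if_neg hd]
      split
      · rename_i hc
        -- the two characters at i are '<' '$'
        have hcast : (((i + 2 : Nat)) : Int) = (i : Int) + 2 := by push_cast; ring
        have htake : (s.drop i).take 2 = ['<', '$'] := by
          have hc' : PySem.List.slice s (some (i : Int)) (some (((i + 2 : Nat)) : Int)) = ['<', '$'] := by
            rw [hcast]; exact hc
          rw [PySem.List.slice_natCast] at hc'
          simpa using hc'
        obtain ⟨t, hsplit⟩ : ∃ t, s.drop i = '<' :: '$' :: t := by
          match h' : s.drop i with
          | [] => rw [h'] at htake; simp at htake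
          | [a] => rw [h'] at htake; simp at htake
          | a :: b :: t =>
            rw [h'] at htake; simp at htake
            exact ⟨t, by rw [htake.1, htake.2]⟩
        have ht : t = s.drop (i + 2) := by
          have := congrArg (List.drop 2) hsplit
          simpa [List.drop_drop] using this.symm
        subst ht
        have h2 : i + 2 ≤ s.length := by
          have := congrArg List.length hsplit
          simp at this
          omega
        have hfind : PySem.Chars.findFrom s ['>'] ((i : Int) + 2) none =
            if PySem.Chars.find (s.drop (i + 2)) ['>'] = -1 then -1
            else ((i + 2 : Nat) : Int) + PySem.Chars.find (s.drop (i + 2)) ['>'] := by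
          rw [← hcast]; exact PySem.Chars.findFrom_natCast s ['>'] (i + 2) h2
        have hdieC : ¬ ((('<' :: '$' :: s.drop (i + 2)).take 17).map PySem.Chars.lowerChar = pvDieTok) := by
          rw [← hsplit]; exact hdie0
        have hge := PySem.Chars.neg_one_le_find (s.drop (i + 2)) ['>']
        split
        · rename_i he
          -- a '>' was found
          have hfne : PySem.Chars.find (s.drop (i + 2)) ['>'] ≠ -1 := by
            intro h0; rw [hfind, if_pos h0] at he; exact he rfl
          have hfnn : 0 ≤ PySem.Chars.find (s.drop (i + 2)) ['>'] := by omega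
          set f := (PySem.Chars.find (s.drop (i + 2)) ['>']).toNat with hf
          have hspec := PySem.Chars.find_spec (s := s.drop (i + 2)) (sub := ['>']) hfnn
          have hat : (s.drop (i + 2))[f]? = some '>' := by
            have := (singleton_prefix_iff _ _).mp hspec.1
            rwa [List.head?_drop] at this
          have hmin : ∀ j, j < f → (s.drop (i + 2))[j]? ≠ some '>' := by
            intro j hj hcontra
            exact hspec.2 j hj ((singleton_prefix_iff _ _).mpr (by rwa [List.head?_drop]))
          have hskip := skipGt_first (s.drop (i + 2)) f hat hmin
          have hctrlC : pvCtrl ('<' :: '$' :: s.drop (i + 2)) = some ((s.drop (i + 2)).drop (f + 1)) := by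
            simp only [pvCtrl, and_self, if_true]; exact hskip
          have hE : (PySem.Chars.findFrom s ['>'] ((i : Int) + 2) none).toNat = i + 2 + f := by
            rw [hfind, if_neg hfne]
            omega
          rw [loopA_eq s ((PySem.Chars.findFrom s ['>'] ((i : Int) + 2) none).toNat + 1) result, hE]
          conv_rhs => rw [hsplit, pvSub_cons]
          rw [if_neg hdieC]
          simp only [hctrlC]
          rw [List.drop_drop]
          have harith : i + 2 + (f + 1) = i + 2 + f + 1 := by omega
          rw [harith]
        · rename_i he
          -- no '>' after i+2: the '<' survives
          have hfe : PySem.Chars.find (s.drop (i + 2)) ['>'] = -1 := by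
            by_contra h0
            apply he
            rw [hfind, if_neg h0]
            omega
          have hnm : '>' ∉ s.drop (i + 2) := by
            intro hmem
            obtain ⟨l1, l2, h12⟩ := List.append_of_mem hmem
            have : ['>'] <:+: s.drop (i + 2) := ⟨l1, l2, by simp [h12]⟩
            exact (PySem.Chars.find_eq_neg_one_iff _ _).mp hfe this
          have hctrl : pvCtrl (s.drop i) = none := by
            rw [hsplit]; simp only [pvCtrl, and_self, if_true]
            exact skipGt_none_of_not_mem hnm
          have hdie : ¬ ((s[i] :: s.drop (i + 1)).take 17).map PySem.Chars.lowerChar = pvDieTok := by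
            rw [← hdrop]; exact hdie0
          have hctrlC2 : pvCtrl (s[i] :: s.drop (i + 1)) = none := by
            rw [← hdrop]; exact hctrl
          rw [loopA_eq s (i + 1) (result ++ [s[i]])]
          conv_rhs => rw [hdrop, pvSub_cons]
          rw [if_neg hdie]
          simp only [hctrlC2]
          simp
      · rename_i hc
        -- no control code at i: the character survives
        have hctrl : pvCtrl (s.drop i) = none := by
          rw [hdrop]
          rcases h' : s.drop (i + 1) with _ | ⟨c2, t⟩
          · rfl
          · simp only [pvCtrl]
            rw [if_neg]
            rintro ⟨h1, h2'⟩
            apply hc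
            have hcast : (((i + 2 : Nat)) : Int) = (i : Int) + 2 := by push_cast; ring
            rw [← hcast, PySem.List.slice_natCast]
            simp only [Nat.add_sub_cancel_left]
            rw [hdrop, h']
            simp [h1, h2']
        have hdie : ¬ ((s[i] :: s.drop (i + 1)).take 17).map PySem.Chars.lowerChar = pvDieTok := by
          rw [← hdrop]; exact hdie0
        have hctrlC2 : pvCtrl (s[i] :: s.drop (i + 1)) = none := by
          rw [← hdrop]; exact hctrl
        rw [loopA_eq s (i + 1) (result ++ [s[i]])]
        conv_rhs => rw [hdrop, pvSub_cons]
        rw [if_neg hdie]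
        simp only [hctrlC2]
        simp
termination_by s.length - i
decreasing_by
  all_goals omega

theorem ports_agree (line : String) : extract_text_chars_py line = extract_text_chars_py_alt line := by
  unfold extract_text_chars_py extract_text_chars_py_alt
  have h := loopA_eq line.toList 0 []
  simp only [List.drop_zero, List.nil_append] at h
  rw [h]

-- ===== VERDICT (by name: the statement is the Claim_ definition above) =====
theorem extract_text_chars_py_spec : Claim_equal_extract_text_chars_py := by
  intro line _
  unfold Spec_extract_text_chars_py
  exact ports_agree line
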